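-- pv_equiv track=rewrite | github.com/Alex-Criwer/Tetris_game | myTetris.py | createFieldOfColors
-- ===== SOURCE A (Python) =====
-- black = (0, 0, 0)
--
-- def createFieldOfColors(cellToColor={}):
--     fieldOfColors = [[black for j in range(15)] for i in
--                      range(20)]
--     for y in range(len(fieldOfColors)):
--         for x in range(len(fieldOfColors[y])):
--             if (x, y) in cellToColor:
--                 cellWithColor = cellToColor[(x, y)]
--                 fieldOfColors[y][x] = cellWithColor
--     return fieldOfColors
-- ===== SOURCE B (Python) =====
-- black = (0, 0, 0)
--
-- def createFieldOfColors(cellToColor={}):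
--     fieldOfColors = [[black for j in range(15)] for i in range(20)]
--     for (x, y), color in cellToColor.items():
--         if 0 <= x < 15 and 0 <= y < 20:
--             fieldOfColors[y][x] = color
--     return fieldOfColors
-- ===== Notes on version B (the rewrite author's own statement) =====
-- stated objective: simpler
-- what changed: Instead of scanning all 300 grid cells and testing dict membership for each, B builds the black grid once and makes a single pass over cellToColor.items(), writing each in-bounds (x,y) entry directly into the grid; Pre_ only excludes association lists with duplicate (x,y) keys, which no Python dict can represent (there A's first-match lookup and B's last-write order would differ).
import Mathlib
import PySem

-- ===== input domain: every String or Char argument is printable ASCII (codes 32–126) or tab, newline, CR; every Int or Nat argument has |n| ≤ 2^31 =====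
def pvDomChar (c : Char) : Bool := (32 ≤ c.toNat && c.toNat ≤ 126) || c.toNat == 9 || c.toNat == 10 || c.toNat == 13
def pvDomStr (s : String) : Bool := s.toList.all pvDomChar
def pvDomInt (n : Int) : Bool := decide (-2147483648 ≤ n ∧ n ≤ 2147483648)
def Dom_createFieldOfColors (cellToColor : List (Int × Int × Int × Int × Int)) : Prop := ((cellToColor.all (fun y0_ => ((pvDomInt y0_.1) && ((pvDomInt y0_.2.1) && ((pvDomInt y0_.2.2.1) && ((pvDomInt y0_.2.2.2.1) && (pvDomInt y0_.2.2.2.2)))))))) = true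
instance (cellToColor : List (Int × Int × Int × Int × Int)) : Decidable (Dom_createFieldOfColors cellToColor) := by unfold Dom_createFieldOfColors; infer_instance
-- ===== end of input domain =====

-- B builds the same 20x15 black grid but fills it in ONE pass over cellToColor's items
-- (writing each in-bounds key directly) instead of scanning all 300 cells and testing
-- membership per cell; objective: simpler.

-- ===== PORT A =====
-- module constant 'black'
def pvBlack : Int × Int × Int := (0, 0, 0)

def createFieldOfColors (cellToColor : List (Int × Int × Int × Int × Int)) : List (List (Int × Int × Int)) :=
  let fieldOfColors := (PySem.List.pyRange 0 20 1).map (fun _i => (PySem.List.pyRange 0 15 1).map (fun _j => pvBlack))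
  (PySem.List.pyRange 0 (fieldOfColors.length : Int) 1).foldl (fun f y =>
    (PySem.List.pyRange 0 ((PySem.List.pyGetD f y []).length : Int) 1).foldl (fun f x =>
      -- '(x, y) in cellToColor' + 'cellToColor[(x, y)]' = first matching key of the assoc list
      match cellToColor.find? (fun e => (e.1, e.2.1) == (x, y)) with
      | some e => PySem.List.pySetD f y (PySem.List.pySetD (PySem.List.pyGetD f y []) x e.2.2)
      | none => f) f) fieldOfColors

-- ===== PORT B =====
def createFieldOfColors_alt (cellToColor : List (Int × Int × Int × Int × Int)) : List (List (Int × Int × Int)) :=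
  let fieldOfColors := (PySem.List.pyRange 0 20 1).map (fun _i => (PySem.List.pyRange 0 15 1).map (fun _j => pvBlack))
  cellToColor.foldl (fun f e =>
    if 0 ≤ e.1 ∧ e.1 < 15 ∧ 0 ≤ e.2.1 ∧ e.2.1 < 20 then
      PySem.List.pySetD f e.2.1 (PySem.List.pySetD (PySem.List.pyGetD f e.2.1 []) e.1 e.2.2)
    else f) fieldOfColors

-- ===== PRECONDITION & SPEC =====
-- Pre_ excludes association lists with duplicate (x, y) keys — unrepresentable as a Python
-- dict (insertion overwrites) — on which A's first-match lookup vs B's last-write order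
-- would be an accident of the list representation.
def Pre_createFieldOfColors (cellToColor : List (Int × Int × Int × Int × Int)) : Prop :=
  (cellToColor.map (fun e => (e.1, e.2.1))).Nodup
instance (cellToColor : List (Int × Int × Int × Int × Int)) : Decidable (Pre_createFieldOfColors cellToColor) := by unfold Pre_createFieldOfColors; infer_instance

def pvWitness_createFieldOfColors : (List (Int × Int × Int × Int × Int)) := [(1, 2, 10, 20, 30), (0, 0, 255, 0, 0)]

def Spec_createFieldOfColors (cellToColor : List (Int × Int × Int × Int × Int)) (out : List (List (Int × Int × Int))) : Prop := out = createFieldOfColors_alt cellToColor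
instance (cellToColor : List (Int × Int × Int × Int × Int)) (out : List (List (Int × Int × Int))) : Decidable (Spec_createFieldOfColors cellToColor out) := by unfold Spec_createFieldOfColors; infer_instance

-- ===== CLAIM (what is proved, stated in full; the proofs are below) =====
def Claim_equal_createFieldOfColors : Prop := ∀ (cellToColor : List (Int × Int × Int × Int × Int)), Dom_createFieldOfColors cellToColor → Pre_createFieldOfColors cellToColor → Spec_createFieldOfColors cellToColor (createFieldOfColors cellToColor)

-- ===== LEMMAS AND PROOFS =====

-- the colour both programs leave at grid cell (x, y)
def pvColor (c : List (Int × Int × Int × Int × Int)) (x y : Int) : Int × Int × Int :=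
  match c.find? (fun e => (e.1, e.2.1) == (x, y)) with
  | some e => e.2.2
  | none => pvBlack

def pvRow (c : List (Int × Int × Int × Int × Int)) (y : Int) : List (Int × Int × Int) :=
  (List.range 15).map (fun (x : Nat) => pvColor c (x : Int) y)

def pvGrid (c : List (Int × Int × Int × Int × Int)) : List (List (Int × Int × Int)) :=
  (List.range 20).map (fun (y : Nat) => pvRow c (y : Int))

theorem pv_set_getD_self {C : Type} (l : List C) (i : Nat) (d : C) (h : i < l.length) :
    l.set i (l.getD i d) = l := by
  rw [List.getD_eq_getElem?_getD, List.getElem?_eq_getElem h]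
  exact List.set_getElem_self ..

-- generic characterisation of a fold over range(0, n) whose body updates position i
theorem pv_gen {C : Type} (d : C) (G : Int → C → C) (s : List C → Int → List C)
    (hs : ∀ (a : List C) (i : Nat), i < a.length → s a (i : Int) = a.set i (G (i : Int) (a.getD i d))) :
    ∀ (n : Nat) (r : List C), n ≤ r.length →
      ((PySem.List.pyRange 0 (n : Int) 1).foldl s r).length = r.length ∧
      ∀ (i : Nat) (h : i < r.length),
        ((PySem.List.pyRange 0 (n : Int) 1).foldl s r)[i]? =
          some (if i < n then G (i : Int) r[i] else r[i]) := by
  intro n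
  induction n with
  | zero =>
      intro r _
      rw [PySem.List.pyRange_one_eq_nil (by omega)]
      refine ⟨rfl, fun i h => ?_⟩
      simp [List.getElem?_eq_getElem h]
  | succ n ih =>
      intro r hn
      have hrange : PySem.List.pyRange 0 ((n + 1 : Nat) : Int) 1
          = PySem.List.pyRange 0 (n : Int) 1 ++ [(n : Int)] := by
        push_cast
        exact PySem.List.pyRange_one_succ_right (by omega)
      obtain ⟨hlen, hget⟩ := ih r (by omega)
      set prev := (PySem.List.pyRange 0 (n : Int) 1).foldl s r with hprev
      have hfold : (PySem.List.pyRange 0 ((n + 1 : Nat) : Int) 1).foldl s r = s prev (n : Int) := by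
        rw [hrange, List.foldl_append]; rfl
      have hnlt : n < prev.length := by omega
      have hstep : s prev (n : Int) = prev.set n (G (n : Int) (prev.getD n d)) := hs prev n hnlt
      have hprevn : prev.getD n d = r[n]'(by omega) := by
        rw [List.getD_eq_getElem?_getD, hget n (by omega)]
        simp
      constructor
      · rw [hfold, hstep]; simp [hlen]
      · intro i h
        rw [hfold, hstep, List.getElem?_set]
        by_cases hin : n = i
        · subst hin
          have hpn : prev[n]'hnlt = r[n] := by
            have h1 := hget n h
            rw [List.getElem?_eq_getElem hnlt] at h1
            have h2 := Option.some.inj h1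
            simpa using h2
          simp [hnlt, hpn]
        · rw [if_neg hin, hget i h]
          simp only [show (i < n + 1) ↔ i < n from by omega]

-- the black starting grid and row of both ports
def pvBlackRow : List (Int × Int × Int) := (PySem.List.pyRange 0 15 1).map (fun _j => pvBlack)

theorem pvBlackRow_len : pvBlackRow.length = 15 := by decide

def pvField0 : List (List (Int × Int × Int)) :=
  (PySem.List.pyRange 0 20 1).map (fun _i => (PySem.List.pyRange 0 15 1).map (fun _j => pvBlack))

theorem pvField0_len : pvField0.length = 20 := by decide
theorem pvField0_get (y : Nat) (h : y < 20) :
    pvField0[y]'(by rw [pvField0_len]; omega) = pvBlackRow := by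
  simp only [pvField0, List.getElem_map, pvBlackRow]

def pvRowStep (c : List (Int × Int × Int × Int × Int)) (y : Int)
    (r : List (Int × Int × Int)) (x : Int) : List (Int × Int × Int) :=
  match c.find? (fun e => (e.1, e.2.1) == (x, y)) with
  | some e => PySem.List.pySetD r x e.2.2
  | none => r

def pvRowFold (c : List (Int × Int × Int × Int × Int)) (y : Int)
    (r : List (Int × Int × Int)) : List (Int × Int × Int) :=
  (PySem.List.pyRange 0 (r.length : Int) 1).foldl (pvRowStep c y) r

theorem pv_factor' (c : List (Int × Int × Int × Int × Int)) (y : Int) :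
    ∀ (xs : List Int) (f : List (List (Int × Int × Int))), 0 ≤ y → y < (f.length : Int) →
      xs.foldl (fun f x =>
        match c.find? (fun e => (e.1, e.2.1) == (x, y)) with
        | some e => PySem.List.pySetD f y (PySem.List.pySetD (PySem.List.pyGetD f y []) x e.2.2)
        | none => f) f
      = PySem.List.pySetD f y (xs.foldl (pvRowStep c y) (PySem.List.pyGetD f y [])) := by
  intro xs
  induction xs with
  | nil =>
      intro f h0 hlen
      simp only [List.foldl_nil]
      rw [PySem.List.pySetD_of_nonneg _ _ h0, PySem.List.pyGetD_eq_getElem f [] h0 hlen]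
      exact (List.set_getElem_self ..).symm
  | cons x xs ih =>
      intro f h0 hlen
      simp only [List.foldl_cons, pvRowStep]
      cases hc : c.find? (fun e => (e.1, e.2.1) == (x, y)) with
      | none =>
          exact ih f h0 hlen
      | some e =>
          have hlen2 : (PySem.List.pySetD f y (PySem.List.pySetD (PySem.List.pyGetD f y []) x e.2.2)).length = f.length := by
            rw [PySem.List.pySetD_of_nonneg _ _ h0]; simp
          rw [ih _ h0 (by rw [hlen2]; exact hlen)]
          have hget : PySem.List.pyGetD (PySem.List.pySetD f y (PySem.List.pySetD (PySem.List.pyGetD f y []) x e.2.2)) y []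
              = PySem.List.pySetD (PySem.List.pyGetD f y []) x e.2.2 := by
            rw [PySem.List.pySetD_of_nonneg _ _ h0,
                PySem.List.pyGetD_eq_getElem _ [] h0 (by simpa using hlen)]
            simp
          rw [hget]
          simp only [show ∀ (xs : List (List (Int × Int × Int))) v, PySem.List.pySetD xs y v = xs.set y.toNat v
            from fun xs v => PySem.List.pySetD_of_nonneg xs v h0]
          rw [List.set_set]

theorem pvRowFold_black (c : List (Int × Int × Int × Int × Int)) (y : Int) :
    pvRowFold c y pvBlackRow = pvRow c y := by
  have hs : ∀ (a : List (Int × Int × Int)) (i : Nat), i < a.length →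
      pvRowStep c y a (i : Int) = a.set i ((fun (x : Int) rv =>
        match c.find? (fun e => (e.1, e.2.1) == (x, y)) with
        | some e => e.2.2
        | none => rv) (i : Int) (a.getD i pvBlack)) := by
    intro a i hi
    unfold pvRowStep
    cases hc : c.find? (fun e => (e.1, e.2.1) == ((i : Int), y)) with
    | some e => simp only [hc, PySem.List.pySetD_natCast]
    | none => simp only [hc]; exact (pv_set_getD_self a i pvBlack hi).symm
  obtain ⟨hlen, hget⟩ := pv_gen pvBlack (fun (x : Int) rv =>
    match c.find? (fun e => (e.1, e.2.1) == (x, y)) with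
    | some e => e.2.2
    | none => rv) (pvRowStep c y) hs pvBlackRow.length pvBlackRow (le_refl _)
  apply List.ext_getElem?
  intro i
  unfold pvRowFold
  by_cases hi : i < 15
  · have hi' : i < pvBlackRow.length := by rw [pvBlackRow_len]; omega
    rw [hget i hi', if_pos hi']
    have hbl : pvBlackRow[i]'hi' = pvBlack := by
      simp only [pvBlackRow, List.getElem_map]
    rw [hbl]
    have hr : (pvRow c y)[i]? = some (pvColor c (i : Int) y) := by
      unfold pvRow
      rw [List.getElem?_map, List.getElem?_range hi]
      rfl
    rw [hr]
    rfl
  · have h1 : ((PySem.List.pyRange 0 ((pvBlackRow.length : Nat) : Int) 1).foldl (pvRowStep c y) pvBlackRow).length = 15 := by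
      rw [hlen, pvBlackRow_len]
    have e1 : ((PySem.List.pyRange 0 ((pvBlackRow.length : Nat) : Int) 1).foldl (pvRowStep c y) pvBlackRow)[i]? = none :=
      List.getElem?_eq_none (by rw [h1]; omega)
    have e2 : (pvRow c y)[i]? = none :=
      List.getElem?_eq_none (by simp [pvRow]; omega)
    rw [e1, e2]

theorem pvA_eq (c : List (Int × Int × Int × Int × Int)) :
    createFieldOfColors c = pvGrid c := by
  unfold createFieldOfColors
  show (PySem.List.pyRange 0 (pvField0.length : Int) 1).foldl (fun f y =>
      (PySem.List.pyRange 0 ((PySem.List.pyGetD f y []).length : Int) 1).foldl (fun f x =>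
        match c.find? (fun e => (e.1, e.2.1) == (x, y)) with
        | some e => PySem.List.pySetD f y (PySem.List.pySetD (PySem.List.pyGetD f y []) x e.2.2)
        | none => f) f) pvField0 = pvGrid c
  have hs : ∀ (a : List (List (Int × Int × Int))) (i : Nat), i < a.length →
      (fun f y => (PySem.List.pyRange 0 ((PySem.List.pyGetD f y []).length : Int) 1).foldl (fun f x =>
        match c.find? (fun e => (e.1, e.2.1) == (x, y)) with
        | some e => PySem.List.pySetD f y (PySem.List.pySetD (PySem.List.pyGetD f y []) x e.2.2)
        | none => f) f) a (i : Int)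
      = a.set i ((fun (y : Int) r => pvRowFold c y r) (i : Int) (a.getD i [])) := by
    intro a i hi
    have h0 : (0 : Int) ≤ (i : Int) := by omega
    have hlt : ((i : Nat) : Int) < (a.length : Int) := by exact_mod_cast hi
    simp only
    rw [pv_factor' c (i : Int) _ a h0 hlt, PySem.List.pySetD_natCast]
    unfold pvRowFold
    simp only [PySem.List.pyGetD_natCast]
  obtain ⟨hlen, hget⟩ := pv_gen ([] : List (Int × Int × Int)) (fun (y : Int) r => pvRowFold c y r)
    (fun f y => (PySem.List.pyRange 0 ((PySem.List.pyGetD f y []).length : Int) 1).foldl (fun f x =>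
      match c.find? (fun e => (e.1, e.2.1) == (x, y)) with
      | some e => PySem.List.pySetD f y (PySem.List.pySetD (PySem.List.pyGetD f y []) x e.2.2)
      | none => f) f) hs pvField0.length pvField0 (le_refl _)
  apply List.ext_getElem?
  intro j
  by_cases hj : j < 20
  · have hj' : j < pvField0.length := by rw [pvField0_len]; omega
    rw [hget j hj', if_pos hj', pvField0_get j hj, pvRowFold_black]
    simp [pvGrid, hj]
  · rw [List.getElem?_eq_none (by rw [hlen, pvField0_len]; omega),
        List.getElem?_eq_none (by simp [pvGrid]; omega)]

theorem pvColor_append (l : List (Int × Int × Int × Int × Int)) (e : Int × Int × Int × Int × Int)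
    (he : (e.1, e.2.1) ∉ l.map (fun a => (a.1, a.2.1))) (i j : Int) :
    pvColor (l ++ [e]) i j = if e.1 = i ∧ e.2.1 = j then e.2.2 else pvColor l i j := by
  unfold pvColor
  rw [List.find?_append]
  by_cases hk : e.1 = i ∧ e.2.1 = j
  · have hnone : l.find? (fun a => (a.1, a.2.1) == (i, j)) = none := by
      rw [List.find?_eq_none]
      intro a ha hpa
      have hkey : (a.1, a.2.1) = (i, j) := by simpa using hpa
      exact he (by rw [show ((e.1, e.2.1) : Int × Int) = (i, j) from by rw [hk.1, hk.2]]
                   exact List.mem_map.2 ⟨a, ha, hkey⟩)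
    have hpe : ((e.1, e.2.1) == (i, j)) = true := by simp [hk.1, hk.2]
    rw [hnone, if_pos hk]
    simp [hpe]
  · have hpe : ((e.1, e.2.1) == (i, j)) = false := by
      simp only [beq_eq_false_iff_ne, ne_eq, Prod.mk.injEq]
      tauto
    have hone : [e].find? (fun a => (a.1, a.2.1) == (i, j)) = none := by
      simp [hpe]
    rw [hone, Option.or_none, if_neg hk]

theorem pvRow_append_of (l : List (Int × Int × Int × Int × Int)) (e : Int × Int × Int × Int × Int)
    (he : (e.1, e.2.1) ∉ l.map (fun a => (a.1, a.2.1))) (j : Int)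
    (hcond : ∀ (i : Nat), i < 15 → ¬(e.1 = (i : Int) ∧ e.2.1 = j)) :
    pvRow (l ++ [e]) j = pvRow l j := by
  unfold pvRow
  apply List.map_congr_left
  intro x hx
  rw [pvColor_append l e he]
  exact if_neg (hcond x (List.mem_range.mp hx))

theorem pvRow_len (c : List (Int × Int × Int × Int × Int)) (y : Int) : (pvRow c y).length = 15 := by
  simp [pvRow]

theorem pvGrid_len (c : List (Int × Int × Int × Int × Int)) : (pvGrid c).length = 20 := by
  simp [pvGrid]

theorem pvRow_get? (c : List (Int × Int × Int × Int × Int)) (y : Int) (i : Nat) (hi : i < 15) :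
    (pvRow c y)[i]? = some (pvColor c (i : Int) y) := by
  unfold pvRow
  rw [List.getElem?_map, List.getElem?_range hi]
  rfl

theorem pvGrid_get? (c : List (Int × Int × Int × Int × Int)) (j : Nat) (hj : j < 20) :
    (pvGrid c)[j]? = some (pvRow c (j : Int)) := by
  unfold pvGrid
  rw [List.getElem?_map, List.getElem?_range hj]
  rfl

theorem pvRow_append_eq (l : List (Int × Int × Int × Int × Int)) (e : Int × Int × Int × Int × Int)
    (he : (e.1, e.2.1) ∉ l.map (fun a => (a.1, a.2.1)))
    (hx0 : 0 ≤ e.1) (hx15 : e.1 < 15) :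
    pvRow (l ++ [e]) e.2.1 = (pvRow l e.2.1).set e.1.toNat e.2.2 := by
  apply List.ext_getElem?
  intro ii
  by_cases hii : ii < 15
  · rw [pvRow_get? _ _ ii hii, pvColor_append l e he, List.getElem?_set]
    by_cases hxi : e.1.toNat = ii
    · have hx1 : e.1 = (ii : Int) := by omega
      have hlen : e.1.toNat < (pvRow l e.2.1).length := by rw [pvRow_len]; omega
      rw [if_pos ⟨hx1, rfl⟩, if_pos hxi, if_pos hlen]
    · have hx1 : ¬(e.1 = (ii : Int) ∧ e.2.1 = e.2.1) := fun hh => hxi (by omega)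
      rw [if_neg hx1, if_neg hxi, pvRow_get? _ _ ii hii]
  · rw [List.getElem?_eq_none (by rw [pvRow_len]; omega),
        List.getElem?_eq_none (by rw [List.length_set, pvRow_len]; omega)]

theorem pvGrid_append_in (l : List (Int × Int × Int × Int × Int)) (e : Int × Int × Int × Int × Int)
    (he : (e.1, e.2.1) ∉ l.map (fun a => (a.1, a.2.1)))
    (hb : 0 ≤ e.1 ∧ e.1 < 15 ∧ 0 ≤ e.2.1 ∧ e.2.1 < 20) :
    pvGrid (l ++ [e]) = (pvGrid l).set e.2.1.toNat ((pvRow l e.2.1).set e.1.toNat e.2.2) := by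
  apply List.ext_getElem?
  intro jj
  by_cases hjj : jj < 20
  · rw [pvGrid_get? _ jj hjj, List.getElem?_set]
    by_cases hyj : e.2.1.toNat = jj
    · have hy1 : e.2.1 = (jj : Int) := by omega
      have hlen : e.2.1.toNat < (pvGrid l).length := by rw [pvGrid_len]; omega
      rw [if_pos hyj, if_pos hlen, ← hy1, pvRow_append_eq l e he hb.1 hb.2.1]
    · have hy1 : e.2.1 ≠ (jj : Int) := fun hh => hyj (by omega)
      rw [if_neg hyj, pvGrid_get? _ jj hjj,
          pvRow_append_of l e he (jj : Int) (fun i _ hh => hy1 hh.2)]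
  · rw [List.getElem?_eq_none (by rw [pvGrid_len]; omega),
        List.getElem?_eq_none (by rw [List.length_set, pvGrid_len]; omega)]

theorem pvGrid_append_out (l : List (Int × Int × Int × Int × Int)) (e : Int × Int × Int × Int × Int)
    (he : (e.1, e.2.1) ∉ l.map (fun a => (a.1, a.2.1)))
    (hb : ¬(0 ≤ e.1 ∧ e.1 < 15 ∧ 0 ≤ e.2.1 ∧ e.2.1 < 20)) :
    pvGrid (l ++ [e]) = pvGrid l := by
  unfold pvGrid
  apply List.map_congr_left
  intro jj hjj
  have hjj20 : jj < 20 := List.mem_range.mp hjj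
  exact pvRow_append_of l e he (jj : Int) (fun i hi hh => hb ⟨by omega, by omega, by omega, by omega⟩)

theorem pvB_eq (c : List (Int × Int × Int × Int × Int))
    (h : (c.map (fun e => (e.1, e.2.1))).Nodup) :
    createFieldOfColors_alt c = pvGrid c := by
  unfold createFieldOfColors_alt
  show c.foldl (fun f e =>
      if 0 ≤ e.1 ∧ e.1 < 15 ∧ 0 ≤ e.2.1 ∧ e.2.1 < 20 then
        PySem.List.pySetD f e.2.1 (PySem.List.pySetD (PySem.List.pyGetD f e.2.1 []) e.1 e.2.2)
      else f) pvField0 = pvGrid c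
  induction c using List.reverseRecOn with
  | nil => decide
  | append_singleton l e ih =>
      rw [List.map_append, List.map_cons, List.map_nil] at h
      have hl : (l.map (fun a => (a.1, a.2.1))).Nodup := (List.nodup_append.mp h).1
      have he : (e.1, e.2.1) ∉ l.map (fun a => (a.1, a.2.1)) := by
        intro hmem
        exact (List.nodup_append.mp h).2.2 _ hmem _ (List.mem_singleton_self _) rfl
      rw [List.foldl_append, List.foldl_cons, List.foldl_nil, ih hl]
      by_cases hb : 0 ≤ e.1 ∧ e.1 < 15 ∧ 0 ≤ e.2.1 ∧ e.2.1 < 20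
      · rw [if_pos hb]
        have h20 : (pvGrid l).length = 20 := pvGrid_len l
        have hgetrow : PySem.List.pyGetD (pvGrid l) e.2.1 [] = pvRow l e.2.1 := by
          rw [PySem.List.pyGetD_eq_getElem _ [] hb.2.2.1 (by rw [h20]; exact_mod_cast hb.2.2.2)]
          simp only [pvGrid, List.getElem_map, List.getElem_range, Int.toNat_of_nonneg hb.2.2.1]
        rw [hgetrow, PySem.List.pySetD_of_nonneg _ _ hb.1, PySem.List.pySetD_of_nonneg _ _ hb.2.2.1]
        exact (pvGrid_append_in l e he hb).symm
      · rw [if_neg hb]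
        exact (pvGrid_append_out l e he hb).symm

-- ===== VERDICT (by name: the statement is the Claim_ definition above) =====
theorem createFieldOfColors_spec : Claim_equal_createFieldOfColors := by
  intro c _ hpre
  unfold Spec_createFieldOfColors
  rw [pvA_eq, pvB_eq c hpre]
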